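-- pv_equiv track=rewrite | github.com/NachoMemes/NachoMemes | nachomemes/render.py | _reflow_text
-- ===== SOURCE A (Python) =====
-- from itertools import chain, takewhile
-- from typing import IO, Callable, Iterable, List, Optional, Tuple, TypeVar, Sequence, Generator
--
-- T = TypeVar('T')
--
-- def partition_on(pred: Callable[[T],bool], seq: Iterable[T]) -> Iterable[Iterable[T]]:
--     "Split a sequence into multuple sub-sequences using a provided value as the boundary"
--     i = iter(seq)
--     while True:
--         # note that we need to do an explicit StopIteration check because
--         # takewhile returns an empty sequence if it encounters StopIteration
--         try:
--             n = next(i)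
--         except StopIteration:
--             return
--         # return the next sub-sequence up to the boundary.
--         yield takewhile(lambda v: not pred(v), chain([n], i))
--
-- def partition_on_value(value: T, seq: Iterable[T]) -> Iterable[Iterable[T]]:
--     pred: Callable[[T],bool] = lambda v: v == value
--     return partition_on(pred, seq)
--
-- def _reflow_text(text, count) -> List[str]:
--     """Using slashes, break up the provided text into the requested number of boxes"""
--
--     if len(text) == count:
--         return text
--
--     # if we are expecting a single string, smash everything together replacing
--     # slash with newline
--     if count == 1:
--         return ["\n".join(" ".join(l) for l in partition_on_value("/", text))]
--
--     # if we see a double slash, use that as the text box boundary, and smash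
--     # the sub-sequences together replacing slash with newline
--     if "//" in text:
--         result = [
--             "\n".join(" ".join(l) for l in partition_on_value("/", b))
--             for b in partition_on_value("//", text)
--         ]
--         assert len(result) == count
--         return result
--
--     # if we just see a single slash, use that as the text box boundary
--     if "/" in text:
--         result = [" ".join(l) for l in partition_on_value("/", text)]
--         assert len(result) == count
--         return result
--
--     raise ValueError(f"could not fit provided text into {count} boxes")
-- ===== SOURCE B (Python) =====
-- def _rsplit(toks, sep):
--     """Group tokens between occurrences of sep, built back-to-front in one
--     right-to-left pass (a trailing sep closes the group before it)."""
--     groups = []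
--     for t in reversed(toks):
--         if t == sep:
--             groups = [[]] + groups
--         elif groups:
--             groups = [[t] + groups[0]] + groups[1:]
--         else:
--             groups = [[t]]
--     return groups
--
-- def _reflow_text(text, count):
--     """Using slashes, break up the provided text into the requested number of boxes"""
--     if len(text) == count:
--         return text
--     if count == 1:
--         return ["\n".join(" ".join(g) for g in _rsplit(text, "/"))]
--     if "//" in text:
--         result = ["\n".join(" ".join(g) for g in _rsplit(b, "/"))
--                   for b in _rsplit(text, "//")]
--     elif "/" in text:
--         result = [" ".join(g) for g in _rsplit(text, "/")]
--     else:
--         raise ValueError(f"could not fit provided text into {count} boxes")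
--     assert len(result) == count
--     return result
-- ===== Notes on version B (the rewrite author's own statement) =====
-- stated objective: alternative
-- what changed: Replaces the lazy generator partition (partition_on with itertools.takewhile/chain over a shared iterator) by a single right-to-left pass that builds the groups back-to-front with an accumulator; the four-way branch structure and the ' '/'\n' joins are kept.
import Mathlib
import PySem

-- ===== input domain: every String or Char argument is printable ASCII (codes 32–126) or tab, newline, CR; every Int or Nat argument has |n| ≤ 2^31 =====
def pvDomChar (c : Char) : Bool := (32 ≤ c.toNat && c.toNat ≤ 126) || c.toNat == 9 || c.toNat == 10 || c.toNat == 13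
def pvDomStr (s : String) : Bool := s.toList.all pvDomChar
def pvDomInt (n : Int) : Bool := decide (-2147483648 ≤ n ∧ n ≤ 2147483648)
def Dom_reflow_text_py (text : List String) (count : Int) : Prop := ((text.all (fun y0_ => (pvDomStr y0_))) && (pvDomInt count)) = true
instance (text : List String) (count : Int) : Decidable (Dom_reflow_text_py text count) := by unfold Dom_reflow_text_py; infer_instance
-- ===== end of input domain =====

-- B replaces the lazy generator/takewhile partition with a single right-to-left
-- fold that builds the groups back-to-front (objective: alternative decomposition).


-- ===== PORT A =====
-- partition_on_value / partition_on: the generator yields, one after another,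
-- the maximal prefix of the remaining iterator not containing the boundary;
-- takewhile also consumes (and discards) the boundary element itself.
def partitionOnValue (sep : String) : List String → List (List String)
  | [] => []
  | x :: xs =>
    ((x :: xs).takeWhile (fun v => v != sep)) ::
      partitionOnValue sep (((x :: xs).dropWhile (fun v => v != sep)).drop 1)
termination_by l => l.length
decreasing_by
  have h := List.length_dropWhile_le (fun v => v != sep) (x :: xs)
  simp only [List.length_drop, List.length_cons] at *
  omega

-- _reflow_text; the `assert` passes and the ValueError is not raised on Pre_,
-- so the port returns the computed result (resp. []) there.
def reflow_text_py (text : List String) (count : Int) : List String :=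
  if (text.length : Int) = count then text
  else if count = 1 then
    [PySem.Str.join "\n" ((partitionOnValue "/" text).map (fun l => PySem.Str.join " " l))]
  else if "//" ∈ text then
    (partitionOnValue "//" text).map
      (fun b => PySem.Str.join "\n" ((partitionOnValue "/" b).map (fun l => PySem.Str.join " " l)))
  else if "/" ∈ text then
    (partitionOnValue "/" text).map (fun l => PySem.Str.join " " l)
  else []  -- raise ValueError (excluded by Pre_)

-- ===== PORT B =====
-- Source B's loop over reversed(toks) that prepends to the front of `groups`
-- is the right fold of this step function.
def rsplitStep (sep : String) (t : String) (groups : List (List String)) : List (List String) :=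
  if t = sep then [] :: groups
  else match groups with
    | [] => [[t]]
    | g :: gs => (t :: g) :: gs

def rsplit (toks : List String) (sep : String) : List (List String) :=
  List.foldr (rsplitStep sep) [] toks

def reflow_text_py_alt (text : List String) (count : Int) : List String :=
  if (text.length : Int) = count then text
  else if count = 1 then
    [PySem.Str.join "\n" ((rsplit text "/").map (fun g => PySem.Str.join " " g))]
  else if "//" ∈ text then
    (rsplit text "//").map
      (fun b => PySem.Str.join "\n" ((rsplit b "/").map (fun g => PySem.Str.join " " g)))
  else if "/" ∈ text then
    (rsplit text "/").map (fun g => PySem.Str.join " " g)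
  else []  -- raise ValueError (excluded by Pre_)

-- ===== PRECONDITION & SPEC =====
-- number of groups the slash-partition produces (trailing separator closes the
-- last group instead of opening an empty one)
def pvGroupCount (sep : String) (text : List String) : Int :=
  (text.count sep : Int) + 1 - (if text.getLast? = some sep then 1 else 0)

-- Pre_ = exactly the inputs on which A returns: otherwise A raises the
-- AssertionError (box count mismatch) or the ValueError (no slash at all).
def Pre_reflow_text_py (text : List String) (count : Int) : Prop :=
  (text.length : Int) = count ∨ count = 1 ∨
  ("//" ∈ text ∧ count = pvGroupCount "//" text) ∨
  ("//" ∉ text ∧ "/" ∈ text ∧ count = pvGroupCount "/" text)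
instance (text : List String) (count : Int) : Decidable (Pre_reflow_text_py text count) := by
  unfold Pre_reflow_text_py; infer_instance

def pvWitness_reflow_text_py : List String × Int := (["hello", "/", "world"], 2)

def Spec_reflow_text_py (text : List String) (count : Int) (out : List String) : Prop := out = reflow_text_py_alt text count
instance (text : List String) (count : Int) (out : List String) : Decidable (Spec_reflow_text_py text count out) := by unfold Spec_reflow_text_py; infer_instance

-- ===== CLAIM (what is proved, stated in full; the proofs are below) =====
def Claim_equal_reflow_text_py : Prop := ∀ (text : List String) (count : Int), Dom_reflow_text_py text count → Pre_reflow_text_py text count → Spec_reflow_text_py text count (reflow_text_py text count)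

-- ===== LEMMAS AND PROOFS =====
-- the fold satisfies the same "peel one group" recurrence as partition_on_value
theorem rsplit_eq_peel (sep : String) :
    ∀ (l : List String), l ≠ [] →
      rsplit l sep =
        (l.takeWhile (fun v => v != sep)) ::
          rsplit ((l.dropWhile (fun v => v != sep)).drop 1) sep := by
  intro l
  induction l with
  | nil => intro h; exact absurd rfl h
  | cons x xs ih =>
    intro _
    by_cases hx : x = sep
    · subst hx
      simp [rsplit, rsplitStep, List.takeWhile, List.dropWhile]
    · have hx' : (x != sep) = true := by simp [hx]
      rcases xs with _ | ⟨y, ys⟩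
      · simp [rsplit, rsplitStep, hx, hx', List.takeWhile, List.dropWhile]
      · have hys := ih (by simp)
        simp only [rsplit, List.foldr] at hys ⊢
        rw [hys]
        simp [rsplitStep, hx, hx', List.takeWhile, List.dropWhile]

theorem partitionOnValue_eq_rsplit (sep : String) (l : List String) :
    partitionOnValue sep l = rsplit l sep := by
  induction l using partitionOnValue.induct sep with
  | case1 => simp [partitionOnValue, rsplit]
  | case2 x xs ih =>
    rw [partitionOnValue, rsplit_eq_peel sep (x :: xs) (by simp), ih]

-- ===== VERDICT (by name: the statement is the Claim_ definition above) =====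
theorem reflow_text_py_spec : Claim_equal_reflow_text_py := by
  intro text count _ _
  unfold Spec_reflow_text_py reflow_text_py reflow_text_py_alt
  simp only [partitionOnValue_eq_rsplit]
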